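-- pv_equiv track=rewrite | github.com/sanayei/ciq | concepts/backtracking.py | allpermutation
-- ===== SOURCE A (Python) =====
-- def allpermutation(lst):
--     s = set()
--
--     def dfs(path, t):
--         if path:
--             s.add(path)
--         for i in range(len(t)):
--             dfs(path+t[i], t[:i]+t[i+1:])
--
--     dfs('', lst)
--     return s
-- ===== SOURCE B (Python) =====
-- def allpermutation(lst):
--     s = set()
--     stack = [("", lst)]
--     while stack:
--         path, t = stack.pop()
--         if path:
--             s.add(path)
--         for i in reversed(range(len(t))):
--             stack.append((path + t[i], t[:i] + t[i+1:]))
--     return s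
-- ===== Notes on version B (the rewrite author's own statement) =====
-- stated objective: alternative
-- what changed: Replaces the nested recursive closure mutating a shared set by an iterative worklist loop over an explicit stack of (prefix, remaining) pairs, pushing children in reverse so the while/pop loop visits the same tree without any recursion.
import Mathlib
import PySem

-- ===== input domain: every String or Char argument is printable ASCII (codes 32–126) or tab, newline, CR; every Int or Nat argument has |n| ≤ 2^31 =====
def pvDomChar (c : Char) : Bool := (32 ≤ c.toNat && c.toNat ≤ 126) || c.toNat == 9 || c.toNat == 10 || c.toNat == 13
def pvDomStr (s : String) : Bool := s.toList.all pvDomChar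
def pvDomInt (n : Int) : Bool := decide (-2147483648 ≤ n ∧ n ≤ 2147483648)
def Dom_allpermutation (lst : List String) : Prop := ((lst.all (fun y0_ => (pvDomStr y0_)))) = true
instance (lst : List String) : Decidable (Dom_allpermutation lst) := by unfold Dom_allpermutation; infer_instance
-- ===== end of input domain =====

-- B replaces A's nested recursive closure (which mutates a shared set while threading a growing
-- prefix) by an iterative worklist loop over an explicit stack of (prefix, remaining) pairs;
-- objective: alternative decomposition (recursion → explicit stack), same exponential cost.

-- ===== PORT A =====
-- A: nested dfs mutating a shared set s, threading the prefix `path`.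
mutual
def pvDfsA (path : String) (t : List String) (s : PySem.Set String) : PySem.Set String :=
  pvDfsALoop path t 0 (if path = "" then s else PySem.Set.add s path)
termination_by (t.length, t.length + 1)

def pvDfsALoop (path : String) (t : List String) (i : Nat) (s : PySem.Set String) : PySem.Set String :=
  if _h : i < t.length then
    pvDfsALoop path t (i + 1)
      (pvDfsA (path ++ PySem.List.pyGetD t (i : Int) "")
        (PySem.List.slice t none (some (i : Int)) ++ PySem.List.slice t (some ((i : Int) + 1)) none) s)
  else s
termination_by (t.length, t.length - i)
decreasing_by
  · have h1 : PySem.List.slice t none (some (i : Int)) = t.take i := PySem.List.slice_to_natCast t i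
    have h2 : PySem.List.slice t (some ((i : Int) + 1)) none = t.drop (i + 1) := by
      have := PySem.List.slice_from_natCast t (i + 1); push_cast at this ⊢; exact this
    simp only [h1, h2, List.length_append, List.length_take, List.length_drop]
    left; omega
  · right; omega
end

def allpermutation (lst : List String) : List String :=
  pvDfsA "" lst PySem.Set.empty

-- ===== PORT B =====
-- B: explicit stack of (path, remaining) pairs, while/pop loop; children pushed in reversed
-- index order so the pop order equals increasing index order.  The Lean stack keeps Python's
-- TOP (list end, popped by .pop()) at the HEAD, so append = cons and pop = match on head.
def pvChild (path : String) (t : List String) (i : Int) : String × List String :=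
  (path ++ PySem.List.pyGetD t i "",
   PySem.List.slice t none (some i) ++ PySem.List.slice t (some (i + 1)) none)

-- size of the search tree rooted at a node with n remaining elements (termination measure only)
def pvNodes : Nat → Nat
  | 0 => 1
  | n + 1 => (n + 1) * pvNodes n + 1

-- the reversed-range push loop equals prepending the children in increasing index order
theorem pvFold_stack {α : Type} (f : Int → α) (l : List Int) (rest : List α) :
    l.reverse.foldl (fun st i => f i :: st) rest = l.map f ++ rest := by
  induction l generalizing rest with
  | nil => rfl
  | cons x xs ih =>
    simp only [List.reverse_cons, List.foldl_append, List.foldl_cons, List.foldl_nil, ih,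
      List.map_cons, List.cons_append]

theorem pvChild_len (path : String) (t : List String) (k : Nat) (hk : k < t.length) :
    (pvChild path t (k : Int)).2.length = t.length - 1 := by
  have h1 : PySem.List.slice t none (some (k : Int)) = t.take k := PySem.List.slice_to_natCast t k
  have h2 : PySem.List.slice t (some ((k : Int) + 1)) none = t.drop (k + 1) := by
    have := PySem.List.slice_from_natCast t (k + 1); push_cast at this ⊢; exact this
  simp only [pvChild, h1, h2, List.length_append, List.length_take, List.length_drop]
  omega

theorem pvStack_potential (path : String) (t : List String) (rest : List (String × List String)) :
    ((((PySem.List.pyRange 0 (t.length : Int) 1).reverse).foldl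
        (fun st i => pvChild path t i :: st) rest).map (fun e => pvNodes e.2.length)).sum
      < pvNodes t.length + ((rest.map (fun e => pvNodes e.2.length)).sum) := by
  rw [pvFold_stack]
  rw [PySem.List.pyRange_one]
  have hcast : ((t.length : Int) - 0).toNat = t.length := by omega
  rw [hcast]
  simp only [List.map_append, List.sum_append, List.map_map]
  have hsum : (((List.range t.length).map ((fun e => pvNodes e.2.length) ∘ pvChild path t ∘ fun k : Nat => (0 : Int) + (k : Int)))).sum
      = t.length * pvNodes (t.length - 1) := by
    rw [List.sum_eq_card_nsmul _ (pvNodes (t.length - 1))]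
    · simp [List.length_range, smul_eq_mul]
    · intro x hx
      simp only [List.mem_map, List.mem_range] at hx
      obtain ⟨k, hk, rfl⟩ := hx
      simp only [Function.comp, Int.zero_add]
      rw [pvChild_len path t k hk]
  rw [hsum]
  cases t with
  | nil => simp [pvNodes]
  | cons a l =>
    simp only [List.length_cons, pvNodes, Nat.add_sub_cancel]
    omega

def pvLoopB : List (String × List String) → PySem.Set String → PySem.Set String
  | [], s => s
  | (path, t) :: rest, s =>
      pvLoopB
        (((PySem.List.pyRange 0 (t.length : Int) 1).reverse).foldl
          (fun st i => pvChild path t i :: st) rest)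
        (if path = "" then s else PySem.Set.add s path)
termination_by st _ => (st.map (fun e => pvNodes e.2.length)).sum
decreasing_by
  simp only [List.map_cons, List.sum_cons]
  exact pvStack_potential path t rest

def allpermutation_alt (lst : List String) : List String :=
  pvLoopB [("", lst)] PySem.Set.empty

-- ===== PRECONDITION & SPEC =====
def Spec_allpermutation (lst : List String) (out : List String) : Prop := out = allpermutation_alt lst
instance (lst : List String) (out : List String) : Decidable (Spec_allpermutation lst out) := by unfold Spec_allpermutation; infer_instance

-- ===== CLAIM (what is proved, stated in full; the proofs are below) =====
def Claim_equal_allpermutation : Prop := ∀ (lst : List String), Dom_allpermutation lst → Spec_allpermutation lst (allpermutation lst)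

-- ===== LEMMAS AND PROOFS =====

theorem pvInner (n : Nat)
    (H : ∀ (t : List String), t.length ≤ n → ∀ (path : String)
      (rest : List (String × List String)) (s : PySem.Set String),
      pvLoopB ((path, t) :: rest) s = pvLoopB rest (pvDfsA path t s)) :
    ∀ (k : Nat) (t : List String), t.length ≤ n + 1 → ∀ (i : Nat), t.length ≤ i + k →
    ∀ (path : String) (rest : List (String × List String)) (s : PySem.Set String),
    pvLoopB (((List.range' i (t.length - i)).map (fun j : Nat => pvChild path t (j : Int))) ++ rest) s
      = pvLoopB rest (pvDfsALoop path t i s) := by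
  intro k
  induction k with
  | zero =>
    intro t ht i hik path rest s
    have hm : t.length - i = 0 := by omega
    rw [pvDfsALoop]
    simp [hm, dif_neg (by omega : ¬ i < t.length)]
  | succ k ih =>
    intro t ht i hik path rest s
    by_cases hi : i < t.length
    · have hm : t.length - i = (t.length - (i + 1)) + 1 := by omega
      rw [hm, List.range'_succ, List.map_cons, List.cons_append]
      have hchildlen : (pvChild path t (i : Int)).2.length ≤ n := by
        rw [pvChild_len path t i hi]; omega
      rw [show (pvChild path t (i : Int) :: ((List.range' (i + 1) (t.length - (i + 1))).map
            (fun j : Nat => pvChild path t (j : Int)) ++ rest))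
          = ((pvChild path t (i : Int)).1, (pvChild path t (i : Int)).2)
            :: ((List.range' (i + 1) (t.length - (i + 1))).map (fun j : Nat => pvChild path t (j : Int)) ++ rest)
        from rfl]
      rw [H _ hchildlen]
      rw [ih t ht (i + 1) (by omega)]
      conv_rhs => rw [pvDfsALoop]
      simp only [dif_pos hi]
      rfl
    · have hm : t.length - i = 0 := by omega
      rw [pvDfsALoop]
      simp [hm, dif_neg hi]

theorem pvMain (n : Nat) : ∀ (t : List String), t.length ≤ n → ∀ (path : String)
    (rest : List (String × List String)) (s : PySem.Set String),
    pvLoopB ((path, t) :: rest) s = pvLoopB rest (pvDfsA path t s) := by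
  induction n with
  | zero =>
    intro t ht path rest s
    have ht0 : t = [] := List.length_eq_zero_iff.mp (by omega)
    subst ht0
    rw [pvLoopB, pvDfsA, pvDfsALoop]
    simp
  | succ n ih =>
    intro t ht path rest s
    rw [pvLoopB, pvDfsA]
    rw [pvFold_stack]
    have hrange : (PySem.List.pyRange 0 (t.length : Int) 1).map (pvChild path t)
        = (List.range' 0 t.length).map (fun j : Nat => pvChild path t (j : Int)) := by
      rw [PySem.List.pyRange_one]
      have hcast : ((t.length : Int) - 0).toNat = t.length := by omega
      rw [hcast, List.map_map, List.range_eq_range']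
      simp [Function.comp]
    rw [hrange]
    have := pvInner n ih t.length t ht 0 (by omega) path rest
      (if path = "" then s else PySem.Set.add s path)
    simpa using this

-- ===== VERDICT (by name: the statement is the Claim_ definition above) =====
theorem allpermutation_spec : Claim_equal_allpermutation := by
  intro lst _
  unfold Spec_allpermutation allpermutation allpermutation_alt
  rw [pvMain lst.length lst le_rfl "" [] PySem.Set.empty]
  rw [pvLoopB]
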